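-- pv_equiv track=rewrite | github.com/CapritaAndrei/CompanyClassifier4.0 | archive/CompanyClassifierv1/src/mapping/naics_lookup.py | _extract_naics_from_pattern
-- ===== SOURCE A (Python) =====
-- from typing import Dict, List, Tuple, Optional
--
-- def _extract_naics_from_pattern(niche: str) -> Optional[str]:
--     """Extract NAICS code based on industry patterns."""
--     niche_lower = niche.lower()
--
--     # Manufacturing patterns
--     if any(term in niche_lower for term in ['manufacturing', 'production', 'factory']):
--         if 'food' in niche_lower or 'fruit' in niche_lower or 'vegetable' in niche_lower:
--             return "311000"  # Food Manufacturing
--         elif 'wood' in niche_lower or 'lumber' in niche_lower: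
--             return "321000"  # Wood Product Manufacturing
--         elif 'plastic' in niche_lower:
--             return "326000"  # Plastics Manufacturing
--         else:
--             return "330000"  # Manufacturing (general)
--
--     # Construction patterns
--     if any(term in niche_lower for term in ['construction', 'building', 'contractor']):
--         if 'heavy' in niche_lower or 'civil' in niche_lower or 'engineering' in niche_lower:
--             return "237000"  # Heavy Construction
--         elif 'residential' in niche_lower:
--             return "236110"  # Residential Building Construction
--         elif 'commercial' in niche_lower:
--             return "236220"  # Commercial Building Construction
--         else:
--             return "236000"  # Construction (general)
--
--     # Agriculture patterns
--     if any(term in niche_lower for term in ['farm', 'agriculture', 'crop', 'livestock']):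
--         if 'crop' in niche_lower or 'farming' in niche_lower:
--             return "111000"  # Crop Production
--         elif 'livestock' in niche_lower or 'animal' in niche_lower:
--             return "112000"  # Animal Production
--         else:
--             return "110000"  # Agriculture (general)
--
--     # Transportation patterns
--     if any(term in niche_lower for term in ['transportation', 'shipping', 'freight', 'trucking']):
--         if 'water' in niche_lower or 'marine' in niche_lower:
--             return "483000"  # Water Transportation
--         elif 'air' in niche_lower or 'aviation' in niche_lower:
--             return "481000"  # Air Transportation
--         elif 'truck' in niche_lower or 'freight' in niche_lower:
--             return "484000"  # Truck Transportation
--         else: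
--             return "480000"  # Transportation (general)
--
--     # Services patterns
--     if any(term in niche_lower for term in ['consulting', 'professional', 'services']):
--         if 'environmental' in niche_lower:
--             return "541620"  # Environmental Consulting
--         elif 'management' in niche_lower:
--             return "541611"  # Management Consulting
--         elif 'computer' in niche_lower or 'software' in niche_lower:
--             return "541512"  # Computer Systems Design
--         elif 'engineering' in niche_lower:
--             return "541330"  # Engineering Services
--         elif 'architectural' in niche_lower:
--             return "541310"  # Architectural Services
--         else:
--             return "541000"  # Professional Services (general)
--
--     # Repair/Maintenance patterns
--     if any(term in niche_lower for term in ['repair', 'maintenance']):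
--         if 'automotive' in niche_lower or 'auto' in niche_lower or 'car' in niche_lower:
--             return "811100"  # Automotive Repair
--         else:
--             return "811000"  # Repair and Maintenance (general)
--
--     return None
-- ===== SOURCE B (Python) =====
-- # Different algorithm: instead of an ordered chain of branch tests, B builds a flat
-- # keyword index, collects ALL matches in one pass, and selects the answer by minimum
-- # (group, rank) -- correct because A's "first matching branch" is exactly the
-- # minimal-index matching group and, within it, the minimal-rank matching keyword.
--
-- _TRIGGERS = [
--     ['manufacturing', 'production', 'factory'],
--     ['construction', 'building', 'contractor'],
--     ['farm', 'agriculture', 'crop', 'livestock'],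
--     ['transportation', 'shipping', 'freight', 'trucking'],
--     ['consulting', 'professional', 'services'],
--     ['repair', 'maintenance'],
-- ]
-- _DEFAULTS = ['330000', '236000', '110000', '480000', '541000', '811000']
-- # flat keyword index: (term, group, rank-within-group, code)
-- _KEYWORDS = [
--     ('food', 0, 0, '311000'), ('fruit', 0, 0, '311000'), ('vegetable', 0, 0, '311000'),
--     ('wood', 0, 1, '321000'), ('lumber', 0, 1, '321000'),
--     ('plastic', 0, 2, '326000'),
--     ('heavy', 1, 0, '237000'), ('civil', 1, 0, '237000'), ('engineering', 1, 0, '237000'),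
--     ('residential', 1, 1, '236110'),
--     ('commercial', 1, 2, '236220'),
--     ('crop', 2, 0, '111000'), ('farming', 2, 0, '111000'),
--     ('livestock', 2, 1, '112000'), ('animal', 2, 1, '112000'),
--     ('water', 3, 0, '483000'), ('marine', 3, 0, '483000'),
--     ('air', 3, 1, '481000'), ('aviation', 3, 1, '481000'),
--     ('truck', 3, 2, '484000'), ('freight', 3, 2, '484000'),
--     ('environmental', 4, 0, '541620'),
--     ('management', 4, 1, '541611'),
--     ('computer', 4, 2, '541512'), ('software', 4, 2, '541512'),
--     ('engineering', 4, 3, '541330'),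
--     ('architectural', 4, 4, '541310'),
--     ('automotive', 5, 0, '811100'), ('auto', 5, 0, '811100'), ('car', 5, 0, '811100'),
-- ]
--
--
-- def _extract_naics_from_pattern(niche):
--     s = niche.lower()
--     triggered = [g for g, terms in enumerate(_TRIGGERS) if any(t in s for t in terms)]
--     if not triggered:
--         return None
--     g = min(triggered)
--     hits = [(r, code) for (t, gg, r, code) in _KEYWORDS if gg == g and t in s]
--     if not hits:
--         return _DEFAULTS[g]
--     return min(hits, key=lambda h: h[0])[1]
-- ===== Notes on version B (the rewrite author's own statement) =====
-- stated objective: alternative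
-- what changed: B replaces A's ordered chain of branch tests by a flat keyword index: it collects all triggered groups and all keyword hits in comprehension passes and selects the answer as the minimum (group, rank) match, instead of returning at the first matching branch.
import Mathlib
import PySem

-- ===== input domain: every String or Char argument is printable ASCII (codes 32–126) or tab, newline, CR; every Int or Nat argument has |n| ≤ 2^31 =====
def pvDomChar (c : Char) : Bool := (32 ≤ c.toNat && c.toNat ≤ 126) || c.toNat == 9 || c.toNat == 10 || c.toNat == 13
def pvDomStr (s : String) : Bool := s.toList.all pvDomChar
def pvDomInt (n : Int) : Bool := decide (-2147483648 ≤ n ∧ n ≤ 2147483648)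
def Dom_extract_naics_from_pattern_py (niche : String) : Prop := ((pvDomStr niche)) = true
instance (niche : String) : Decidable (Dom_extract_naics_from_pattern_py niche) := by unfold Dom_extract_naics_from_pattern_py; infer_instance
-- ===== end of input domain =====

-- B replaces A's ordered branch chain by a flat keyword index with min-(group,rank) selection (objective: alternative).

-- ===== PORT A =====
def extract_naics_from_pattern_py (niche : String) : Option String :=
  let s := PySem.Str.lower niche
  if (["manufacturing", "production", "factory"].any (fun t => PySem.Str.isIn t s)) then
    if PySem.Str.isIn "food" s || PySem.Str.isIn "fruit" s || PySem.Str.isIn "vegetable" s then some "311000"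
    else if PySem.Str.isIn "wood" s || PySem.Str.isIn "lumber" s then some "321000"
    else if PySem.Str.isIn "plastic" s then some "326000"
    else some "330000"
  else if (["construction", "building", "contractor"].any (fun t => PySem.Str.isIn t s)) then
    if PySem.Str.isIn "heavy" s || PySem.Str.isIn "civil" s || PySem.Str.isIn "engineering" s then some "237000"
    else if PySem.Str.isIn "residential" s then some "236110"
    else if PySem.Str.isIn "commercial" s then some "236220"
    else some "236000"
  else if (["farm", "agriculture", "crop", "livestock"].any (fun t => PySem.Str.isIn t s)) then
    if PySem.Str.isIn "crop" s || PySem.Str.isIn "farming" s then some "111000"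
    else if PySem.Str.isIn "livestock" s || PySem.Str.isIn "animal" s then some "112000"
    else some "110000"
  else if (["transportation", "shipping", "freight", "trucking"].any (fun t => PySem.Str.isIn t s)) then
    if PySem.Str.isIn "water" s || PySem.Str.isIn "marine" s then some "483000"
    else if PySem.Str.isIn "air" s || PySem.Str.isIn "aviation" s then some "481000"
    else if PySem.Str.isIn "truck" s || PySem.Str.isIn "freight" s then some "484000"
    else some "480000"
  else if (["consulting", "professional", "services"].any (fun t => PySem.Str.isIn t s)) then
    if PySem.Str.isIn "environmental" s then some "541620"
    else if PySem.Str.isIn "management" s then some "541611"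
    else if PySem.Str.isIn "computer" s || PySem.Str.isIn "software" s then some "541512"
    else if PySem.Str.isIn "engineering" s then some "541330"
    else if PySem.Str.isIn "architectural" s then some "541310"
    else some "541000"
  else if (["repair", "maintenance"].any (fun t => PySem.Str.isIn t s)) then
    if PySem.Str.isIn "automotive" s || PySem.Str.isIn "auto" s || PySem.Str.isIn "car" s then some "811100"
    else some "811000"
  else none

-- ===== PORT B =====
def naicsTriggers : List (List String) :=
  [ ["manufacturing", "production", "factory"],
    ["construction", "building", "contractor"],
    ["farm", "agriculture", "crop", "livestock"],
    ["transportation", "shipping", "freight", "trucking"],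
    ["consulting", "professional", "services"],
    ["repair", "maintenance"] ]

def naicsDefaults : List String :=
  ["330000", "236000", "110000", "480000", "541000", "811000"]

def naicsKeywords : List (String × Int × Int × String) :=
  [ ("food", 0, 0, "311000"), ("fruit", 0, 0, "311000"), ("vegetable", 0, 0, "311000"),
    ("wood", 0, 1, "321000"), ("lumber", 0, 1, "321000"),
    ("plastic", 0, 2, "326000"),
    ("heavy", 1, 0, "237000"), ("civil", 1, 0, "237000"), ("engineering", 1, 0, "237000"),
    ("residential", 1, 1, "236110"),
    ("commercial", 1, 2, "236220"),
    ("crop", 2, 0, "111000"), ("farming", 2, 0, "111000"),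
    ("livestock", 2, 1, "112000"), ("animal", 2, 1, "112000"),
    ("water", 3, 0, "483000"), ("marine", 3, 0, "483000"),
    ("air", 3, 1, "481000"), ("aviation", 3, 1, "481000"),
    ("truck", 3, 2, "484000"), ("freight", 3, 2, "484000"),
    ("environmental", 4, 0, "541620"),
    ("management", 4, 1, "541611"),
    ("computer", 4, 2, "541512"), ("software", 4, 2, "541512"),
    ("engineering", 4, 3, "541330"),
    ("architectural", 4, 4, "541310"),
    ("automotive", 5, 0, "811100"), ("auto", 5, 0, "811100"), ("car", 5, 0, "811100") ]

def extract_naics_from_pattern_py_alt (niche : String) : Option String :=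
  let s := PySem.Str.lower niche
  let triggered := (PySem.List.enumerate naicsTriggers 0).filterMap
      (fun p => if p.2.any (fun t => PySem.Str.isIn t s) then some p.1 else none)
  match PySem.List.min? triggered (fun x => x) with
  | none => none            -- 'if not triggered: return None'
  | some g =>
      let hits := naicsKeywords.filterMap
          (fun e => if e.2.1 == g && PySem.Str.isIn e.1 s then some (e.2.2.1, e.2.2.2) else none)
      match PySem.List.min? hits (fun h => h.1) with
      | none => PySem.List.pyGet? naicsDefaults g     -- 'if not hits: return _DEFAULTS[g]' (index always in range)
      | some h => some h.2

-- ===== PRECONDITION & SPEC =====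
def Spec_extract_naics_from_pattern_py (niche : String) (out : Option String) : Prop := out = extract_naics_from_pattern_py_alt niche
instance (niche : String) (out : Option String) : Decidable (Spec_extract_naics_from_pattern_py niche out) := by unfold Spec_extract_naics_from_pattern_py; infer_instance

-- ===== CLAIM (what is proved, stated in full; the proofs are below) =====
def Claim_equal_extract_naics_from_pattern_py : Prop := ∀ (niche : String), Dom_extract_naics_from_pattern_py niche → Spec_extract_naics_from_pattern_py niche (extract_naics_from_pattern_py niche)

-- ===== LEMMAS AND PROOFS =====

-- min? keeps the FIRST minimal element: if nothing in the tail beats the head, it is the head.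
lemma pv_min?_cons {α κ : Type} [LT κ] [DecidableLT κ] (a : α) (l : List α) (key : α → κ)
    (h : ∀ x ∈ l, ¬ key x < key a) : PySem.List.min? (a :: l) key = some a := by
  unfold PySem.List.min?
  simp only [List.foldl_cons]
  induction l with
  | nil => rfl
  | cons b t ih =>
      have hb := h b (by simp)
      simp only [List.foldl_cons, if_neg hb]
      exact ih (fun x hx => h x (by simp [hx]))

-- every group index produced by the trigger pass from start k is ≥ k
lemma pv_trig_ge (s : String) (ts : List (List String)) (k : Int) :
    ∀ x ∈ (PySem.List.enumerate ts k).filterMap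
        (fun p => if p.2.any (fun t => PySem.Str.isIn t s) then some p.1 else none), k ≤ x := by
  induction ts generalizing k with
  | nil => intro x hx; simp [PySem.List.enumerate] at hx
  | cons hd tl ih =>
      intro x hx
      rw [PySem.List.enumerate_cons, List.filterMap_cons] at hx
      split at hx
      · have := ih (k + 1) x hx; omega
      · rcases List.mem_cons.mp hx with h | h
        · simp_all
        · have := ih (k + 1) x h; omega


-- ===== VERDICT (by name: the statement is the Claim_ definition above) =====
set_option maxHeartbeats 4000000 in
theorem extract_naics_from_pattern_py_spec : Claim_equal_extract_naics_from_pattern_py := by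
  intro niche _
  unfold Spec_extract_naics_from_pattern_py extract_naics_from_pattern_py extract_naics_from_pattern_py_alt
  dsimp only
  rw [show PySem.List.enumerate naicsTriggers 0 = ((0:Int), ["manufacturing", "production", "factory"]) :: PySem.List.enumerate [["construction", "building", "contractor"], ["farm", "agriculture", "crop", "livestock"], ["transportation", "shipping", "freight", "trucking"], ["consulting", "professional", "services"], ["repair", "maintenance"]] 1 from rfl, List.filterMap_cons]
  by_cases hb0 : (["manufacturing", "production", "factory"].any fun t => PySem.Str.isIn t (PySem.Str.lower niche)) = true
  · simp only [hb0, if_true]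
    rw [pv_min?_cons]
    · simp [naicsKeywords]
      by_cases h0 : PySem.Chars.isIn ['f', 'o', 'o', 'd'] (PySem.Chars.lower niche.toList) = true <;>
      by_cases h1 : PySem.Chars.isIn ['f', 'r', 'u', 'i', 't'] (PySem.Chars.lower niche.toList) = true <;>
      by_cases h2 : PySem.Chars.isIn ['v', 'e', 'g', 'e', 't', 'a', 'b', 'l', 'e'] (PySem.Chars.lower niche.toList) = true <;>
      by_cases h3 : PySem.Chars.isIn ['w', 'o', 'o', 'd'] (PySem.Chars.lower niche.toList) = true <;>
      by_cases h4 : PySem.Chars.isIn ['l', 'u', 'm', 'b', 'e', 'r'] (PySem.Chars.lower niche.toList) = true <;>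
      by_cases h5 : PySem.Chars.isIn ['p', 'l', 'a', 's', 't', 'i', 'c'] (PySem.Chars.lower niche.toList) = true <;>
      simp [h0, h1, h2, h3, h4, h5, PySem.List.min?, naicsDefaults, PySem.List.pyGet?, PySem.List.pyIdx?]
    · intro x hx
      have := pv_trig_ge (PySem.Str.lower niche) [["construction", "building", "contractor"], ["farm", "agriculture", "crop", "livestock"], ["transportation", "shipping", "freight", "trucking"], ["consulting", "professional", "services"], ["repair", "maintenance"]] 1 x hx
      omega
  · simp only [Bool.not_eq_true] at hb0
    simp only [hb0, Bool.false_eq_true, if_false]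
    rw [show PySem.List.enumerate [["construction", "building", "contractor"], ["farm", "agriculture", "crop", "livestock"], ["transportation", "shipping", "freight", "trucking"], ["consulting", "professional", "services"], ["repair", "maintenance"]] 1 = ((1:Int), ["construction", "building", "contractor"]) :: PySem.List.enumerate [["farm", "agriculture", "crop", "livestock"], ["transportation", "shipping", "freight", "trucking"], ["consulting", "professional", "services"], ["repair", "maintenance"]] 2 from rfl, List.filterMap_cons]
    by_cases hb1 : (["construction", "building", "contractor"].any fun t => PySem.Str.isIn t (PySem.Str.lower niche)) = true
    · simp only [hb1, if_true]
      rw [pv_min?_cons]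
      · simp [naicsKeywords]
        by_cases h0 : PySem.Chars.isIn ['h', 'e', 'a', 'v', 'y'] (PySem.Chars.lower niche.toList) = true <;>
        by_cases h1 : PySem.Chars.isIn ['c', 'i', 'v', 'i', 'l'] (PySem.Chars.lower niche.toList) = true <;>
        by_cases h2 : PySem.Chars.isIn ['e', 'n', 'g', 'i', 'n', 'e', 'e', 'r', 'i', 'n', 'g'] (PySem.Chars.lower niche.toList) = true <;>
        by_cases h3 : PySem.Chars.isIn ['r', 'e', 's', 'i', 'd', 'e', 'n', 't', 'i', 'a', 'l'] (PySem.Chars.lower niche.toList) = true <;>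
        by_cases h4 : PySem.Chars.isIn ['c', 'o', 'm', 'm', 'e', 'r', 'c', 'i', 'a', 'l'] (PySem.Chars.lower niche.toList) = true <;>
        simp [h0, h1, h2, h3, h4, PySem.List.min?, naicsDefaults, PySem.List.pyGet?, PySem.List.pyIdx?]
      · intro x hx
        have := pv_trig_ge (PySem.Str.lower niche) [["farm", "agriculture", "crop", "livestock"], ["transportation", "shipping", "freight", "trucking"], ["consulting", "professional", "services"], ["repair", "maintenance"]] 2 x hx
        omega
    · simp only [Bool.not_eq_true] at hb1
      simp only [hb1, Bool.false_eq_true, if_false]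
      rw [show PySem.List.enumerate [["farm", "agriculture", "crop", "livestock"], ["transportation", "shipping", "freight", "trucking"], ["consulting", "professional", "services"], ["repair", "maintenance"]] 2 = ((2:Int), ["farm", "agriculture", "crop", "livestock"]) :: PySem.List.enumerate [["transportation", "shipping", "freight", "trucking"], ["consulting", "professional", "services"], ["repair", "maintenance"]] 3 from rfl, List.filterMap_cons]
      by_cases hb2 : (["farm", "agriculture", "crop", "livestock"].any fun t => PySem.Str.isIn t (PySem.Str.lower niche)) = true
      · simp only [hb2, if_true]
        rw [pv_min?_cons]
        · simp [naicsKeywords]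
          by_cases h0 : PySem.Chars.isIn ['c', 'r', 'o', 'p'] (PySem.Chars.lower niche.toList) = true <;>
          by_cases h1 : PySem.Chars.isIn ['f', 'a', 'r', 'm', 'i', 'n', 'g'] (PySem.Chars.lower niche.toList) = true <;>
          by_cases h2 : PySem.Chars.isIn ['l', 'i', 'v', 'e', 's', 't', 'o', 'c', 'k'] (PySem.Chars.lower niche.toList) = true <;>
          by_cases h3 : PySem.Chars.isIn ['a', 'n', 'i', 'm', 'a', 'l'] (PySem.Chars.lower niche.toList) = true <;>
          simp [h0, h1, h2, h3, PySem.List.min?, naicsDefaults, PySem.List.pyGet?, PySem.List.pyIdx?]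
        · intro x hx
          have := pv_trig_ge (PySem.Str.lower niche) [["transportation", "shipping", "freight", "trucking"], ["consulting", "professional", "services"], ["repair", "maintenance"]] 3 x hx
          omega
      · simp only [Bool.not_eq_true] at hb2
        simp only [hb2, Bool.false_eq_true, if_false]
        rw [show PySem.List.enumerate [["transportation", "shipping", "freight", "trucking"], ["consulting", "professional", "services"], ["repair", "maintenance"]] 3 = ((3:Int), ["transportation", "shipping", "freight", "trucking"]) :: PySem.List.enumerate [["consulting", "professional", "services"], ["repair", "maintenance"]] 4 from rfl, List.filterMap_cons]
        by_cases hb3 : (["transportation", "shipping", "freight", "trucking"].any fun t => PySem.Str.isIn t (PySem.Str.lower niche)) = true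
        · simp only [hb3, if_true]
          rw [pv_min?_cons]
          · simp [naicsKeywords]
            by_cases h0 : PySem.Chars.isIn ['w', 'a', 't', 'e', 'r'] (PySem.Chars.lower niche.toList) = true <;>
            by_cases h1 : PySem.Chars.isIn ['m', 'a', 'r', 'i', 'n', 'e'] (PySem.Chars.lower niche.toList) = true <;>
            by_cases h2 : PySem.Chars.isIn ['a', 'i', 'r'] (PySem.Chars.lower niche.toList) = true <;>
            by_cases h3 : PySem.Chars.isIn ['a', 'v', 'i', 'a', 't', 'i', 'o', 'n'] (PySem.Chars.lower niche.toList) = true <;>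
            by_cases h4 : PySem.Chars.isIn ['t', 'r', 'u', 'c', 'k'] (PySem.Chars.lower niche.toList) = true <;>
            by_cases h5 : PySem.Chars.isIn ['f', 'r', 'e', 'i', 'g', 'h', 't'] (PySem.Chars.lower niche.toList) = true <;>
            simp [h0, h1, h2, h3, h4, h5, PySem.List.min?, naicsDefaults, PySem.List.pyGet?, PySem.List.pyIdx?]
          · intro x hx
            have := pv_trig_ge (PySem.Str.lower niche) [["consulting", "professional", "services"], ["repair", "maintenance"]] 4 x hx
            omega
        · simp only [Bool.not_eq_true] at hb3
          simp only [hb3, Bool.false_eq_true, if_false]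
          rw [show PySem.List.enumerate [["consulting", "professional", "services"], ["repair", "maintenance"]] 4 = ((4:Int), ["consulting", "professional", "services"]) :: PySem.List.enumerate [["repair", "maintenance"]] 5 from rfl, List.filterMap_cons]
          by_cases hb4 : (["consulting", "professional", "services"].any fun t => PySem.Str.isIn t (PySem.Str.lower niche)) = true
          · simp only [hb4, if_true]
            rw [pv_min?_cons]
            · simp [naicsKeywords]
              by_cases h0 : PySem.Chars.isIn ['e', 'n', 'v', 'i', 'r', 'o', 'n', 'm', 'e', 'n', 't', 'a', 'l'] (PySem.Chars.lower niche.toList) = true <;>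
              by_cases h1 : PySem.Chars.isIn ['m', 'a', 'n', 'a', 'g', 'e', 'm', 'e', 'n', 't'] (PySem.Chars.lower niche.toList) = true <;>
              by_cases h2 : PySem.Chars.isIn ['c', 'o', 'm', 'p', 'u', 't', 'e', 'r'] (PySem.Chars.lower niche.toList) = true <;>
              by_cases h3 : PySem.Chars.isIn ['s', 'o', 'f', 't', 'w', 'a', 'r', 'e'] (PySem.Chars.lower niche.toList) = true <;>
              by_cases h4 : PySem.Chars.isIn ['e', 'n', 'g', 'i', 'n', 'e', 'e', 'r', 'i', 'n', 'g'] (PySem.Chars.lower niche.toList) = true <;>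
              by_cases h5 : PySem.Chars.isIn ['a', 'r', 'c', 'h', 'i', 't', 'e', 'c', 't', 'u', 'r', 'a', 'l'] (PySem.Chars.lower niche.toList) = true <;>
              simp [h0, h1, h2, h3, h4, h5, PySem.List.min?, naicsDefaults, PySem.List.pyGet?, PySem.List.pyIdx?]
            · intro x hx
              have := pv_trig_ge (PySem.Str.lower niche) [["repair", "maintenance"]] 5 x hx
              omega
          · simp only [Bool.not_eq_true] at hb4
            simp only [hb4, Bool.false_eq_true, if_false]
            rw [show PySem.List.enumerate [["repair", "maintenance"]] 5 = ((5:Int), ["repair", "maintenance"]) :: PySem.List.enumerate [] 6 from rfl, List.filterMap_cons]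
            by_cases hb5 : (["repair", "maintenance"].any fun t => PySem.Str.isIn t (PySem.Str.lower niche)) = true
            · simp only [hb5, if_true]
              rw [pv_min?_cons]
              · simp [naicsKeywords]
                by_cases h0 : PySem.Chars.isIn ['a', 'u', 't', 'o', 'm', 'o', 't', 'i', 'v', 'e'] (PySem.Chars.lower niche.toList) = true <;>
                by_cases h1 : PySem.Chars.isIn ['a', 'u', 't', 'o'] (PySem.Chars.lower niche.toList) = true <;>
                by_cases h2 : PySem.Chars.isIn ['c', 'a', 'r'] (PySem.Chars.lower niche.toList) = true <;>
                simp [h0, h1, h2, PySem.List.min?, naicsDefaults, PySem.List.pyGet?, PySem.List.pyIdx?]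
              · intro x hx
                have := pv_trig_ge (PySem.Str.lower niche) [] 6 x hx
                omega
            · simp only [Bool.not_eq_true] at hb5
              simp only [hb5, Bool.false_eq_true, if_false]
              simp [PySem.List.enumerate, PySem.List.min?]
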